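-- pv_equiv track=rewrite | github.com/22Pickles/MidnightStrategyAnalysis | int/strategies.py | str1
-- ===== SOURCE A (Python) =====
-- from typing import List
--
-- def str1(roll: List[int], pocket: List[int]) -> List[int]:
--     s: List[int] = []
--     if 1 not in pocket:
--         for i in range(len(roll)):
--             if roll[i] == 1:
--                 s.append(roll[i])
--                 break
--     if 4 not in pocket:
--         for i in range(len(roll)):
--             if roll[i] == 4:
--                 s.append(roll[i])
--                 break
--
--     for i in range(len(roll)):
--         if roll[i] == 6:
--             s.append(roll[i])
--     if len(s) == 0:
--         s.append(max(roll))
--     return s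
-- ===== SOURCE B (Python) =====
-- def str1(roll, pocket):
--     # one pass over roll with an accumulator: flags for 1 and 4,
--     # a collected list of sixes and a running maximum
--     has1 = False
--     has4 = False
--     sixes = []
--     mx = None
--     for d in roll:
--         if d == 1:
--             has1 = True
--         elif d == 4:
--             has4 = True
--         elif d == 6:
--             sixes.append(d)
--         if mx is None or d > mx:
--             mx = d
--     s = []
--     if has1 and 1 not in pocket:
--         s.append(1)
--     if has4 and 4 not in pocket:
--         s.append(4)
--     s += sixes
--     return s if s else [mx]
-- ===== Notes on version B (the rewrite author's own statement) =====
-- stated objective: alternative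
-- what changed: A makes three separate index scans of roll (break-loop for a 1, break-loop for a 4, full scan collecting 6s) plus a separate max(roll) call; B makes ONE pass over roll with an accumulator (has1/has4 flags, a sixes list and a running maximum) and assembles the result afterwards.
import Mathlib
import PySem

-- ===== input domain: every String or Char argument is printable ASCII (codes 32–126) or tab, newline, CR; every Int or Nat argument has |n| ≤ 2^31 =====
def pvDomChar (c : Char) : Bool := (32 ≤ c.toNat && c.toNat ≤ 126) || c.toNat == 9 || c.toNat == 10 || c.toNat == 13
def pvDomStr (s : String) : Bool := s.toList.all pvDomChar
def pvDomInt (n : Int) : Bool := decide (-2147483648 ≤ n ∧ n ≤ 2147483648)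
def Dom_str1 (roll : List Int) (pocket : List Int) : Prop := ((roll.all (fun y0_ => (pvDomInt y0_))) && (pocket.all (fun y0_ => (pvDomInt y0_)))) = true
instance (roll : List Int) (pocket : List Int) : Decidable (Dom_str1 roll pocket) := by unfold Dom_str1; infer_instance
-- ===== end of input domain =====

-- B replaces A's three separate scans of roll (two break-loops and a six-collecting
-- loop) plus the separate max(roll) call by ONE fold over roll with an accumulator
-- (has1/has4 flags, sixes list, running maximum), assembling the result afterwards.

-- ===== PORT A =====
-- 'for i in range(len(roll)): if roll[i] == v: s.append(roll[i]); break'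
def str1_findLoop (v : Int) : List Int → List Int
  | [] => []
  | x :: xs => if x = v then [x] else str1_findLoop v xs

-- 'for i in range(len(roll)): if roll[i] == 6: s.append(roll[i])'
def str1_sixLoop : List Int → List Int
  | [] => []
  | x :: xs => if x = 6 then x :: str1_sixLoop xs else str1_sixLoop xs

def str1 (roll : List Int) (pocket : List Int) : List Int :=
  let s : List Int := []
  let s := if ¬ (1 : Int) ∈ pocket then s ++ str1_findLoop 1 roll else s
  let s := if ¬ (4 : Int) ∈ pocket then s ++ str1_findLoop 4 roll else s
  let s := s ++ str1_sixLoop roll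
  if s.length = 0 then
    -- max(roll): ValueError on empty roll, excluded by Pre_str1
    match PySem.List.max? roll (fun x => x) with
    | some m => s ++ [m]
    | none => s
  else s

-- ===== PORT B =====
-- one step of B's single loop: update has1/has4 flags, the sixes list, the running max
def str1_step (st : Bool × Bool × List Int × Option Int) (d : Int) :
    Bool × Bool × List Int × Option Int :=
  let st' : Bool × Bool × List Int :=
    if d = 1 then (true, st.2.1, st.2.2.1)
    else if d = 4 then (st.1, true, st.2.2.1)
    else if d = 6 then (st.1, st.2.1, st.2.2.1 ++ [d])
    else (st.1, st.2.1, st.2.2.1)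
  let mx : Option Int :=
    match st.2.2.2 with
    | none => some d
    | some m => if m < d then some d else some m
  (st'.1, st'.2.1, st'.2.2, mx)

def str1_alt (roll : List Int) (pocket : List Int) : List Int :=
  let st := roll.foldl str1_step (false, false, [], none)
  let s := (if st.1 ∧ ¬ (1 : Int) ∈ pocket then [(1 : Int)] else [])
        ++ (if st.2.1 ∧ ¬ (4 : Int) ∈ pocket then [(4 : Int)] else [])
        ++ st.2.2.1
  if s ≠ [] then s
  else
    -- mx is None only on empty roll (Python would return [None]); excluded by Pre_str1
    match st.2.2.2 with
    | some m => [m]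
    | none => []

-- ===== PRECONDITION & SPEC =====
-- Pre_ excludes the empty roll, on which A raises ValueError from max([]).
def Pre_str1 (roll : List Int) (pocket : List Int) : Prop := roll ≠ []
instance (roll : List Int) (pocket : List Int) : Decidable (Pre_str1 roll pocket) := by unfold Pre_str1; infer_instance
def pvWitness_str1 : List Int × List Int := ([1, 6, 3], [4])

def Spec_str1 (roll : List Int) (pocket : List Int) (out : List Int) : Prop := out = str1_alt roll pocket
instance (roll : List Int) (pocket : List Int) (out : List Int) : Decidable (Spec_str1 roll pocket out) := by unfold Spec_str1; infer_instance

-- ===== CLAIM (what is proved, stated in full; the proofs are below) =====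
def Claim_equal_str1 : Prop := ∀ (roll : List Int) (pocket : List Int), Dom_str1 roll pocket → Pre_str1 roll pocket → Spec_str1 roll pocket (str1 roll pocket)

-- ===== LEMMAS AND PROOFS =====
-- the running-max update, isolated
def str1_mxUpd (a : Option Int) (d : Int) : Option Int :=
  match a with
  | none => some d
  | some m => if m < d then some d else some m

theorem str1_findLoop_eq (v : Int) (xs : List Int) :
    str1_findLoop v xs = if v ∈ xs then [v] else [] := by
  induction xs with
  | nil => simp [str1_findLoop]
  | cons x t ih =>
    by_cases h : x = v
    · subst h; simp [str1_findLoop]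
    · simp [str1_findLoop, h, ih, Ne.symm h]

theorem str1_sixLoop_eq (xs : List Int) :
    str1_sixLoop xs = xs.filter (fun d => d = 6) := by
  induction xs with
  | nil => simp [str1_sixLoop]
  | cons x t ih =>
    by_cases h : x = (6 : Int) <;> simp [str1_sixLoop, h, ih]

theorem str1_foldl_eq (roll : List Int) (h1 h4 : Bool) (sx : List Int) (mx : Option Int) :
    roll.foldl str1_step (h1, h4, sx, mx)
      = (h1 || decide ((1 : Int) ∈ roll), h4 || decide ((4 : Int) ∈ roll),
         sx ++ roll.filter (fun d => d = 6), roll.foldl str1_mxUpd mx) := by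
  induction roll generalizing h1 h4 sx mx with
  | nil => simp
  | cons x t ih =>
    by_cases hx1 : x = (1 : Int)
    · subst hx1
      simp [List.foldl_cons, str1_step, str1_mxUpd, ih]
    · by_cases hx4 : x = (4 : Int)
      · subst hx4
        simp [List.foldl_cons, str1_step, str1_mxUpd, ih]
      · by_cases hx6 : x = (6 : Int)
        · subst hx6
          simp [List.foldl_cons, str1_step, str1_mxUpd, ih]
        · simp [List.foldl_cons, str1_step, str1_mxUpd, ih, hx1, hx4, hx6,
                Ne.symm hx1, Ne.symm hx4]

theorem str1_mxfold_some (t : List Int) (m : Int) :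
    t.foldl str1_mxUpd (some m) = some (t.foldl max m) := by
  induction t generalizing m with
  | nil => simp
  | cons x s ih =>
    have : str1_mxUpd (some m) x = some (max m x) := by
      by_cases h : m < x
      · simp [str1_mxUpd, h, max_eq_right h.le]
      · simp [str1_mxUpd, h, max_eq_left (not_lt.mp h)]
    simp [List.foldl_cons, this, ih]

-- ===== VERDICT (by name: the statement is the Claim_ definition above) =====
theorem str1_spec : Claim_equal_str1 := by
  intro roll pocket _ pre
  obtain ⟨x, t, rfl⟩ := List.exists_cons_of_ne_nil pre
  unfold Spec_str1 str1 str1_alt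
  rw [str1_foldl_eq]
  simp only [str1_findLoop_eq, str1_sixLoop_eq, Bool.false_or,
    List.foldl_cons, str1_mxUpd, str1_mxfold_some, PySem.List.max?_id_cons]
  by_cases p1 : (1 : Int) ∈ pocket <;>
  by_cases p4 : (4 : Int) ∈ pocket <;>
  by_cases r1 : (1 : Int) ∈ x :: t <;>
  by_cases r4 : (4 : Int) ∈ x :: t <;>
    simp [p1, p4, r1, r4]
  all_goals by_cases r6 : (6 : Int) ∈ x :: t
  all_goals
    first
    | (simp only [List.mem_cons] at r6
       have hd : ¬x = 6 → (6:Int) ∈ t := fun hh => r6.resolve_left (fun h => hh h.symm)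
       have hc : ¬(¬x = 6 ∧ ∀ a ∈ t, ¬a = (6:Int)) := fun hh => hh.2 6 (hd hh.1) rfl
       simp [hc]
       try (intro hx6 h6t; exact absurd (hd hx6) h6t))
    | (simp only [List.mem_cons, not_or] at r6
       obtain ⟨hx', ht'⟩ := r6
       have hx : ¬ x = (6:Int) := fun h => hx' h.symm
       have ht : ∀ a ∈ t, ¬ a = (6:Int) := fun a ha h => ht' (by rw [← h]; exact ha)
       have hf : List.filter (fun d => decide (d = (6:Int))) (x :: t) = [] := by
         refine List.filter_eq_nil_iff.2 ?_
         intro a ha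
         simp only [List.mem_cons] at ha
         rcases ha with rfl | ha
         · simpa using hx
         · simpa using ht a ha
       simp [hx, hf, ht'])
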